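-- pv_equiv track=rewrite | github.com/basicpascal/PythonProjectsMirea | Block A/task_A132.py | special_number
-- ===== SOURCE A (Python) =====
-- def special_number(number):
--     # Тело функции
--     n = number
--     i = len(str(abs(n)))
--     sum = 0
--     while n > 0:
--         digit = n % 10
--         sum += digit ** i
--         n = n // 10
--         i -= 1
--     return sum == number
-- ===== SOURCE B (Python) =====
-- def special_number(number):
--     s = str(abs(number))
--     return number == sum(int(ch) ** (idx + 1) for idx, ch in enumerate(s))
-- ===== Notes on version B (the rewrite author's own statement) =====
-- stated objective: simpler
-- what changed: B walks the decimal string most-significant-first with enumerate-derived exponents and a single generator sum, instead of A's least-significant-first arithmetic digit extraction with a mutable accumulator and a descending exponent counter.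
import Mathlib
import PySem

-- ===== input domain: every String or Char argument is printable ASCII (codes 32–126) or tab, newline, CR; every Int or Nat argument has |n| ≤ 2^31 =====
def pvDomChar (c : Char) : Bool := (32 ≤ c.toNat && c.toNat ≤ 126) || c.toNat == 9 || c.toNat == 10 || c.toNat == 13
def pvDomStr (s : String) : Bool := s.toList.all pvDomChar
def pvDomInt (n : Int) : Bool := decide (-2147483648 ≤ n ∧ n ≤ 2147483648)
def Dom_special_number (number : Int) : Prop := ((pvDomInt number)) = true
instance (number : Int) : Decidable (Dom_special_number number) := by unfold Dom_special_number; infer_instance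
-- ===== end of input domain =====

-- B sums the digit powers most-significant-first over the decimal string with enumerate-derived
-- exponents, instead of A's least-significant-first arithmetic extraction with a descending counter.


-- ===== PORT A =====
-- the while loop, state (n, i, sum); Python's `digit ** i` is ported as `digit ^ i.toNat`,
-- exact since the loop only runs with exponent i ≥ 1
def specialLoopA (n i s : Int) : Int :=
  if 0 < n then
    specialLoopA (PySem.Int.floordiv n 10) (i - 1) (s + (PySem.Int.mod n 10) ^ i.toNat)
  else s
termination_by n.toNat
decreasing_by
  rename_i h
  have h10 : (0:Int) < 10 := by omega
  rw [PySem.Int.floordiv_eq_ediv_of_pos h10]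
  omega

def special_number (number : Int) : Bool :=
  let n := number
  let i := PySem.Str.len (PySem.Int.toStr (if n < 0 then -n else n))
  specialLoopA n i 0 == number

-- ===== PORT B =====
def special_number_alt (number : Int) : Bool :=
  let s := PySem.Int.toStr (if number < 0 then -number else number)
  number ==
    (PySem.List.enumerate s.toList 0).foldl
      (fun acc p => acc + ((PySem.Int.ofChars? [p.2]).getD 0) ^ (p.1 + 1).toNat) 0

-- ===== PRECONDITION & SPEC =====
def Spec_special_number (number : Int) (out : Bool) : Prop := out = special_number_alt number
instance (number : Int) (out : Bool) : Decidable (Spec_special_number number out) := by unfold Spec_special_number; infer_instance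

-- ===== CLAIM (what is proved, stated in full; the proofs are below) =====
def Claim_equal_special_number : Prop := ∀ (number : Int), Dom_special_number number → Spec_special_number number (special_number number)

-- ===== LEMMAS AND PROOFS =====

-- B's summand function and its running sum over a digit-character list
def digVal (c : Char) : Int := (PySem.Int.ofChars? [c]).getD 0

def bSum (cs : List Char) : Int :=
  (PySem.List.enumerate cs 0).foldl
    (fun acc p => acc + ((PySem.Int.ofChars? [p.2]).getD 0) ^ (p.1 + 1).toNat) 0

lemma digVal_digitChar (d : Nat) (hd : d < 10) : digVal (Nat.digitChar d) = (d : Int) := by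
  interval_cases d <;> decide

-- `Nat.toDigitsCore` pushes its accumulator to the right
lemma toDigitsCore_append :
    ∀ (f n : Nat) (l : List Char), n < f →
      Nat.toDigitsCore 10 f n l = Nat.toDigitsCore 10 f n [] ++ l := by
  intro f
  induction f with
  | zero => intro n l h; omega
  | succ f ih =>
    intro n l _
    simp only [Nat.toDigitsCore]
    by_cases hq : n / 10 = 0
    · simp [hq]
    · simp only [hq, if_false]
      have hlt : n / 10 < f := by
        have := Nat.div_lt_self (by omega : 0 < n) (by omega : 1 < 10)
        omega
      rw [ih _ _ hlt, ih _ [Nat.digitChar (n % 10)] hlt, List.append_assoc]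
      simp

-- fuel irrelevance for `Nat.toDigitsCore` (empty accumulator)
lemma toDigitsCore_fuel :
    ∀ (f₁ f₂ n : Nat), n < f₁ → n < f₂ →
      Nat.toDigitsCore 10 f₁ n [] = Nat.toDigitsCore 10 f₂ n [] := by
  intro f₁
  induction f₁ with
  | zero => intro f₂ n h; omega
  | succ f₁ ih =>
    intro f₂ n h₁ h₂
    cases f₂ with
    | zero => omega
    | succ f₂ =>
      simp only [Nat.toDigitsCore]
      by_cases hq : n / 10 = 0
      · simp [hq]
      · simp only [hq, if_false]
        have hn : 0 < n := by omega
        have hlt : n / 10 < n := Nat.div_lt_self hn (by omega)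
        rw [toDigitsCore_append f₁ _ _ (by omega), toDigitsCore_append f₂ _ _ (by omega),
          ih f₂ _ (by omega) (by omega)]

lemma toDigits_small (n : Nat) (h : n < 10) : Nat.toDigits 10 n = [Nat.digitChar n] := by
  simp [Nat.toDigits, Nat.toDigitsCore, Nat.div_eq_of_lt h, Nat.mod_eq_of_lt h]

lemma toDigits_step (n : Nat) (h : 10 ≤ n) :
    Nat.toDigits 10 n = Nat.toDigits 10 (n / 10) ++ [Nat.digitChar (n % 10)] := by
  have hq : n / 10 ≠ 0 := by
    intro h0; have := Nat.div_add_mod n 10; have := Nat.mod_lt n (by omega : 0 < 10); omega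
  have hlt : n / 10 < n := Nat.div_lt_self (by omega) (by omega)
  conv_lhs => rw [Nat.toDigits, Nat.toDigitsCore]
  rw [if_neg hq]
  rw [toDigitsCore_append n _ _ (by omega),
    toDigitsCore_fuel n (n / 10 + 1) (n / 10) (by omega) (by omega)]
  rfl

-- one step of B's sum at the right end
lemma bSum_append (cs : List Char) (c : Char) :
    bSum (cs ++ [c]) = bSum cs + digVal c ^ (cs.length + 1) := by
  unfold bSum
  rw [PySem.List.enumerate_append, List.foldl_append]
  simp [PySem.List.enumerate, digVal]

-- A's loop pushes its accumulator out
lemma specialLoopA_acc (n i s : Int) : specialLoopA n i s = s + specialLoopA n i 0 := by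
  generalize hm : n.toNat = m
  induction m using Nat.strong_induction_on generalizing n i s with
  | _ m IH =>
    conv_lhs => rw [specialLoopA]
    conv_rhs => rw [specialLoopA]
    split_ifs with h
    · have h10 : (0:Int) < 10 := by omega
      have hlt : (PySem.Int.floordiv n 10).toNat < m := by
        rw [PySem.Int.floordiv_eq_ediv_of_pos h10]; omega
      have e1 := IH _ hlt (PySem.Int.floordiv n 10) (i - 1)
        (s + PySem.Int.mod n 10 ^ i.toNat) rfl
      have e2 := IH _ hlt (PySem.Int.floordiv n 10) (i - 1)
        (0 + PySem.Int.mod n 10 ^ i.toNat) rfl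
      rw [e1, e2]
      ring
    · simp

-- B's sum over the digits of m is nonnegative
lemma bSum_nonneg (m : Nat) : 0 ≤ bSum (Nat.toDigits 10 m) := by
  induction m using Nat.strong_induction_on with
  | _ m IH =>
    by_cases h : m < 10
    · rw [toDigits_small m h]
      have : bSum [Nat.digitChar m] = digVal (Nat.digitChar m) ^ 1 := by
        unfold bSum; simp [PySem.List.enumerate, digVal]
      rw [this, digVal_digitChar m h]
      positivity
    · rw [toDigits_step m (by omega), bSum_append]
      have h1 := IH (m / 10) (Nat.div_lt_self (by omega) (by omega))
      have h2 : (0:Int) ≤ digVal (Nat.digitChar (m % 10)) := by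
        rw [digVal_digitChar _ (Nat.mod_lt m (by omega))]; positivity
      positivity

-- the two digit-power sums coincide for positive m
lemma loop_eq_bSum (m : Nat) (hm : 0 < m) :
    specialLoopA (m : Int) ((Nat.toDigits 10 m).length : Int) 0 = bSum (Nat.toDigits 10 m) := by
  induction m using Nat.strong_induction_on with
  | _ m IH =>
    rw [specialLoopA]
    rw [if_pos (by exact_mod_cast hm)]
    have hdiv : PySem.Int.floordiv (m : Int) 10 = ((m / 10 : Nat) : Int) := by
      exact_mod_cast PySem.Int.floordiv_natCast m 10
    have hmod : PySem.Int.mod (m : Int) 10 = ((m % 10 : Nat) : Int) := by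
      exact_mod_cast PySem.Int.mod_natCast m 10
    rw [hdiv, hmod]
    by_cases h : m < 10
    · have hq : m / 10 = 0 := Nat.div_eq_of_lt h
      have hr : m % 10 = m := Nat.mod_eq_of_lt h
      rw [toDigits_small m h]
      have hlen : (([Nat.digitChar m] : List Char).length : Int) = 1 := by simp
      rw [hlen, hq, hr]
      rw [specialLoopA, if_neg (by simp)]
      have : bSum [Nat.digitChar m] = digVal (Nat.digitChar m) ^ 1 := by
        unfold bSum; simp [PySem.List.enumerate, digVal]
      rw [this, digVal_digitChar m h]
      norm_num
    · have hq : 0 < m / 10 := Nat.div_pos (by omega) (by omega)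
      have hstep := toDigits_step m (by omega)
      rw [hstep, bSum_append]
      have hlen : ((Nat.toDigits 10 (m / 10) ++ [Nat.digitChar (m % 10)]).length : Int)
          = ((Nat.toDigits 10 (m / 10)).length : Int) + 1 := by simp
      rw [hlen]
      rw [specialLoopA_acc]
      rw [show ((Nat.toDigits 10 (m / 10)).length : Int) + 1 - 1
          = ((Nat.toDigits 10 (m / 10)).length : Int) from by ring]
      rw [IH (m / 10) (Nat.div_lt_self (by omega) (by omega)) hq]
      rw [digVal_digitChar _ (Nat.mod_lt m (by omega))]
      have hexp : (((Nat.toDigits 10 (m / 10)).length : Int) + 1).toNat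
          = (Nat.toDigits 10 (m / 10)).length + 1 := by omega
      rw [hexp]
      ring

-- B's value, rewritten through bSum
lemma alt_eq (number : Int) :
    special_number_alt number
      = (number == bSum (PySem.Int.toChars (if number < 0 then -number else number))) := by
  simp only [special_number_alt, bSum, PySem.Int.toList_toStr]

-- A's digit-string length, rewritten through toChars
lemma a_eq (number : Int) :
    special_number number
      = (specialLoopA number ((PySem.Int.toChars (if number < 0 then -number else number)).length : Int) 0
          == number) := by
  unfold special_number
  simp [PySem.Str.len_eq, PySem.Int.toList_toStr]

lemma toChars_nonneg (m : Nat) : PySem.Int.toChars (m : Int) = Nat.toDigits 10 m := by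
  unfold PySem.Int.toChars
  rw [if_neg (by omega)]
  simp

-- ===== VERDICT (by name: the statement is the Claim_ definition above) =====
theorem special_number_spec : Claim_equal_special_number := by
  intro number _
  unfold Spec_special_number
  rw [a_eq, alt_eq]
  rcases lt_trichotomy number 0 with hneg | hzero | hpos
  · -- negative: A's loop never runs (0 ≠ number); B's sum is nonnegative (≠ number)
    rw [if_pos hneg]
    have habs : -number = ((-number).toNat : Int) := by omega
    rw [habs, toChars_nonneg]
    rw [specialLoopA, if_neg (by omega)]
    have h0 := bSum_nonneg (-number).toNat
    have hL : (0 == number) = false := by simp; omega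
    have hR : (number == bSum (Nat.toDigits 10 (-number).toNat)) = false := by simp; omega
    rw [hL, hR]
  · -- zero: both sides are true (sum 0, digit 0 ** 1 = 0)
    subst hzero
    rw [specialLoopA, if_neg (by omega)]
    decide
  · -- positive: the two digit-power sums coincide
    rw [if_neg (by omega)]
    have habs : number = (number.toNat : Int) := by omega
    rw [habs, toChars_nonneg]
    rw [loop_eq_bSum number.toNat (by omega)]
    simp [eq_comm]
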